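-- pv_equiv track=rewrite | github.com/tahmid-saj/data-structures-algorithms | leetcode/python/0325_maximum_size_subarray_sum_equals_k.py | prefixList
-- ===== SOURCE A (Python) =====
-- def prefixList(nums, k):
--     # put prefixSum[i]: i in hash map, keep the first seen value to ensure maximum length
--     prefixSum, seen, res = [0 for _ in range(len(nums))], {0: -1}, 0
--     for i in range(len(nums)):
--         prefixSum[i] = nums[i] + (prefixSum[i - 1] if i > 0 else 0)
--         if prefixSum[i] not in seen: seen[prefixSum[i]] = i
--
--     for i in range(len(prefixSum)):
--         if (prefixSum[i] - k) in seen: res = max(res, i - seen[prefixSum[i] - k])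
--     return res
-- ===== SOURCE B (Python) =====
-- def prefixList(nums, k):
--     # one pass: running sum + first-occurrence map built on the fly
--     seen = {0: -1}
--     s = 0
--     res = 0
--     for i, x in enumerate(nums):
--         s += x
--         if s - k in seen:
--             res = max(res, i - seen[s - k])
--         if s not in seen:
--             seen[s] = i
--     return res
-- ===== Notes on version B (the rewrite author's own statement) =====
-- stated objective: simpler
-- what changed: Replaced A's prefixSum array plus two separate loops (build-map pass, then query pass) by a single enumerate pass keeping only a running sum, the result and the first-occurrence map, querying before inserting; no prefix-sum list is materialised.
import Mathlib
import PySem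

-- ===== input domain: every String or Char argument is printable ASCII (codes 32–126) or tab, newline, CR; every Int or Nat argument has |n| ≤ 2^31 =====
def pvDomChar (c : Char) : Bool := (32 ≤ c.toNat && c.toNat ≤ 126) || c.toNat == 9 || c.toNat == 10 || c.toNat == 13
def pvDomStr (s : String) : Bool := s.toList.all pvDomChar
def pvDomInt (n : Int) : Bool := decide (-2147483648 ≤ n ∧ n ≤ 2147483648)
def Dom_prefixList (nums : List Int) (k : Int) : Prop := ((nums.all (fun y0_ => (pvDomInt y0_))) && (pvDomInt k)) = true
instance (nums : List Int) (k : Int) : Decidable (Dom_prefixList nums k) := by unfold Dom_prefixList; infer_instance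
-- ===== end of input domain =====

-- B replaces A's prefix-sum array and two separate loops by one enumerate pass with a running sum; same return value; single pass, no prefix array, no speed claim.

-- ===== PORT A =====
-- literal port of A: build prefixSum list + first-occurrence dict in one loop, then a second query loop.
-- all list indices (i, i-1) are in range by construction, so pyGetD's default is never used; i.toNat is exact since i ≥ 0.
def prefixList (nums : List Int) (k : Int) : Int :=
  let n : Int := (nums.length : Int)
  let st := (PySem.List.pyRange 0 n).foldl
    (fun (st : List Int × PySem.Dict Int Int) (i : Int) =>
      let v := PySem.List.pyGetD nums i 0 + (if i > 0 then PySem.List.pyGetD st.1 (i - 1) 0 else 0)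
      let ps := st.1.set i.toNat v
      let seen := if (st.2.get? v).isNone then st.2.insert v i else st.2
      (ps, seen))
    (List.replicate nums.length 0, (PySem.Dict.empty).insert 0 (-1))
  (PySem.List.pyRange 0 (st.1.length : Int)).foldl
    (fun (res : Int) (i : Int) =>
      match st.2.get? (PySem.List.pyGetD st.1 i 0 - k) with
      | some j => max res (i - j)
      | none => res) 0

-- ===== PORT B =====
-- literal port of Source B: one pass over enumerate(nums), running sum s, query seen before inserting.
def prefixList_alt (nums : List Int) (k : Int) : Int :=
  (((PySem.List.enumerate nums).foldl
    (fun (st : Int × Int × PySem.Dict Int Int) (p : Int × Int) =>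
      let s := st.1 + p.2
      let res := match st.2.2.get? (s - k) with
        | some j => max st.2.1 (p.1 - j)
        | none => st.2.1
      let seen := if (st.2.2.get? s).isNone then st.2.2.insert s p.1 else st.2.2
      (s, res, seen))
    (0, 0, (PySem.Dict.empty).insert 0 (-1)))).2.1

-- ===== PRECONDITION & SPEC =====
def Spec_prefixList (nums : List Int) (k : Int) (out : Int) : Prop := out = prefixList_alt nums k
instance (nums : List Int) (k : Int) (out : Int) : Decidable (Spec_prefixList nums k out) := by unfold Spec_prefixList; infer_instance

-- ===== CLAIM (what is proved, stated in full; the proofs are below) =====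
def Claim_equal_prefixList : Prop := ∀ (nums : List Int) (k : Int), Dom_prefixList nums k → Spec_prefixList nums k (prefixList nums k)

-- ===== LEMMAS AND PROOFS =====

-- index of the first occurrence of v in a list
def fIdx : List Int → Int → Option Nat
  | [], _ => none
  | x :: xs, v => if x = v then some 0 else (fIdx xs v).map (· + 1)

-- what both programs' `seen` dicts compute: first index of prefix-sum value v (with 0 pre-seeded at -1)
def firstOcc (P : List Int) (v : Int) : Option Int :=
  if v = 0 then some (-1) else (fIdx P v).map (fun n => (n : Int))

-- the list of prefix sums of nums starting from accumulator s
def psums : List Int → Int → List Int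
  | [], _ => []
  | x :: xs, s => (s + x) :: psums xs (s + x)

-- pure shape of A's second loop: lookup in the FULL prefix-sum list
def foldA' (full : List Int) (k : Int) : List Int → List Int → Int → Int
  | [], _, res => res
  | p :: rest, pre, res =>
      foldA' full k rest (pre ++ [p])
        (match firstOcc full (p - k) with
         | some j => max res ((pre.length : Int) - j)
         | none => res)

-- pure shape of B's loop: lookup in the prefix sums seen SO FAR
def foldB (k : Int) : List Int → List Int → Int → Int
  | [], _, res => res
  | p :: rest, pre, res =>
      foldB k rest (pre ++ [p])
        (match firstOcc pre (p - k) with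
         | some j => max res ((pre.length : Int) - j)
         | none => res)

lemma fIdx_append (pre t : List Int) (v : Int) :
    fIdx (pre ++ t) v =
      match fIdx pre v with
      | some j => some j
      | none => (fIdx t v).map (· + pre.length) := by
  induction pre with
  | nil => simp [fIdx]
  | cons x xs ih =>
      by_cases h : x = v <;> simp [fIdx, h, ih] <;> cases fIdx xs v <;> cases fIdx t v <;>
        simp [Nat.add_assoc]

lemma firstOcc_append_singleton (pre : List Int) (p v : Int) :
    firstOcc (pre ++ [p]) v =
      match firstOcc pre v with
      | some j => some j
      | none => if p = v then some (pre.length : Int) else none := by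
  unfold firstOcc
  by_cases hv : v = 0
  · simp [hv]
  · simp [hv, fIdx_append, fIdx]
    cases fIdx pre v <;> by_cases hp : p = v <;> simp [hp]

lemma firstOcc_prefix_some (pre t : List Int) (v j : Int)
    (h : firstOcc pre v = some j) : firstOcc (pre ++ t) v = some j := by
  unfold firstOcc at *
  by_cases hv : v = 0
  · simpa [hv] using h
  · simp only [hv, if_false, fIdx_append] at *
    cases hm : fIdx pre v with
    | none => rw [hm] at h; simp at h
    | some m => rw [hm] at h; simpa using h

lemma firstOcc_append_none (pre t : List Int) (v : Int)
    (h : firstOcc pre v = none) :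
    firstOcc (pre ++ t) v = (fIdx t v).map (fun m => ((m + pre.length : Nat) : Int)) := by
  unfold firstOcc at *
  by_cases hv : v = 0
  · simp [hv] at h
  · simp only [hv, if_false, fIdx_append] at *
    cases hm : fIdx pre v with
    | none =>
        cases fIdx t v <;> simp [Nat.add_comm]
    | some m => rw [hm] at h; simp at h

lemma firstOcc_append_of_ne (pre : List Int) (p v : Int) (hne : p ≠ v) :
    firstOcc (pre ++ [p]) v = firstOcc pre v := by
  rw [firstOcc_append_singleton]
  cases firstOcc pre v <;> simp [hne]

lemma firstOcc_append_self_of_none (pre : List Int) (p : Int) (h : firstOcc pre p = none) :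
    firstOcc (pre ++ [p]) p = some (pre.length : Int) := by
  rw [firstOcc_append_singleton, h]
  simp

-- the seen-update both programs perform preserves the first-occurrence invariant
lemma seen_update (pre : List Int) (p : Int) (seen : PySem.Dict Int Int)
    (hseen : ∀ v, seen.get? v = firstOcc pre v) :
    ∀ v, (if (seen.get? p).isNone then seen.insert p ((pre.length : Nat) : Int) else seen).get? v
      = firstOcc (pre ++ [p]) v := by
  intro v
  cases hp : firstOcc pre p with
  | none =>
      simp only [hseen p, hp, Option.isNone_none, if_true]
      by_cases hv : v = p
      · subst hv
        rw [PySem.Dict.get?_insert_self, firstOcc_append_self_of_none pre v hp]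
      · rw [PySem.Dict.get?_insert_of_ne seen _ hv, hseen v,
          firstOcc_append_of_ne pre p v (fun h => hv h.symm)]
  | some j =>
      simp only [hseen p, hp, Option.isNone_some, Bool.false_eq_true, if_false, hseen v]
      by_cases hv : v = p
      · subst hv
        rw [firstOcc_prefix_some pre [v] v j hp, hp]
      · rw [firstOcc_append_of_ne pre p v (fun h => hv h.symm)]

lemma psums_getD (xs : List Int) (s : Int) :
    ∀ j, j < xs.length → (psums xs s).getD j 0 = s + ((xs.take (j + 1)).sum) := by
  induction xs generalizing s with
  | nil => intro j hj; simp at hj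
  | cons x t ih =>
      intro j hj
      cases j with
      | zero => simp [psums]
      | succ m =>
          have := ih (s + x) m (by simpa using Nat.lt_of_succ_lt_succ hj)
          simp only [psums, List.getD_cons_succ, List.take_succ_cons, List.sum_cons]
          rw [this]
          ring

lemma psums_length (xs : List Int) (s : Int) : (psums xs s).length = xs.length := by
  induction xs generalizing s with
  | nil => rfl
  | cons x xs ih => simp [psums, ih]

-- the central comparison: with a nonnegative accumulator, full-list lookup = so-far lookup
lemma foldA'_eq_foldB (k : Int) (full : List Int) :
    ∀ rest pre res, full = pre ++ rest → 0 ≤ res →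
      foldA' full k rest pre res = foldB k rest pre res := by
  intro rest
  induction rest with
  | nil => intro pre res _ _; rfl
  | cons p t ih =>
      intro pre res hfull hres
      have hfull' : full = (pre ++ [p]) ++ t := by simp [hfull]
      unfold foldA' foldB
      cases hpre : firstOcc pre (p - k) with
      | some j =>
          have : firstOcc full (p - k) = some j := by
            rw [hfull]; exact firstOcc_prefix_some pre (p :: t) _ j hpre
          rw [this]
          exact ih (pre ++ [p]) _ hfull' (le_trans hres (le_max_left _ _))
      | none =>
          have hf : firstOcc full (p - k) =
              (fIdx (p :: t) (p - k)).map (fun m => ((m + pre.length : Nat) : Int)) := by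
            rw [hfull]; exact firstOcc_append_none pre (p :: t) _ hpre
          cases hm : fIdx (p :: t) (p - k) with
          | none => rw [hf, hm]; exact ih (pre ++ [p]) _ hfull' hres
          | some m =>
              rw [hf, hm]
              have hmax : max res ((pre.length : Int) - ((m + pre.length : Nat) : Int)) = res := by
                push_cast; omega
              simp only [Option.map_some, hmax]
              exact ih (pre ++ [p]) _ hfull' hres

-- B's port computes foldB
lemma alt_loop (k : Int) (xs : List Int) :
    ∀ (pre : List Int) (s res : Int) (seen : PySem.Dict Int Int),
      (∀ v, seen.get? v = firstOcc pre v) →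
      (((PySem.List.enumerate xs ((pre.length : Nat) : Int)).foldl
        (fun (st : Int × Int × PySem.Dict Int Int) (p : Int × Int) =>
          let s := st.1 + p.2
          let res := match st.2.2.get? (s - k) with
            | some j => max st.2.1 (p.1 - j)
            | none => st.2.1
          let seen := if (st.2.2.get? s).isNone then st.2.2.insert s p.1 else st.2.2
          (s, res, seen))
        (s, res, seen))).2.1 = foldB k (psums xs s) pre res := by
  induction xs with
  | nil => intro pre s res seen _; simp [PySem.List.enumerate_nil, psums, foldB]
  | cons x t ih =>
      intro pre s res seen hseen
      have hstep : PySem.List.enumerate (x :: t) ((pre.length : Nat) : Int)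
          = (((pre.length : Nat) : Int), x) :: PySem.List.enumerate t (((pre.length : Nat) : Int) + 1) := by
        simp [PySem.List.enumerate]
      rw [hstep, List.foldl_cons]
      have hcast : (((pre.length : Nat) : Int) + 1) = (((pre ++ [s + x]).length : Nat) : Int) := by
        push_cast [List.length_append]; simp
      simp only [psums, foldB, hseen (s + x - k), hcast]
      exact ih (pre ++ [s + x]) (s + x) _ _ (seen_update pre (s + x) seen hseen)

-- one iteration of A's first loop, on an abstract state
lemma a_step (nums : List Int) (j : Nat) (hj : j + 1 ≤ nums.length)
    (ps : List Int) (seen : PySem.Dict Int Int)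
    (h1 : ps = (psums nums 0).take j ++ List.replicate (nums.length - j) 0)
    (h2 : ∀ v, seen.get? v = firstOcc ((psums nums 0).take j) v) :
    ps.set ((j : Nat) : Int).toNat
        (PySem.List.pyGetD nums ((j : Nat) : Int) 0 +
          (if ((j : Nat) : Int) > 0 then PySem.List.pyGetD ps (((j : Nat) : Int) - 1) 0 else 0))
      = (psums nums 0).take (j + 1) ++ List.replicate (nums.length - (j + 1)) 0 ∧
    ∀ w, (if (seen.get?
          (PySem.List.pyGetD nums ((j : Nat) : Int) 0 +
            (if ((j : Nat) : Int) > 0 then PySem.List.pyGetD ps (((j : Nat) : Int) - 1) 0 else 0))).isNone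
        then seen.insert
          (PySem.List.pyGetD nums ((j : Nat) : Int) 0 +
            (if ((j : Nat) : Int) > 0 then PySem.List.pyGetD ps (((j : Nat) : Int) - 1) 0 else 0))
          ((j : Nat) : Int)
        else seen).get? w = firstOcc ((psums nums 0).take (j + 1)) w := by
  have hjn : j < nums.length := hj
  have hPlen : (psums nums 0).length = nums.length := psums_length nums 0
  have hjP : j < (psums nums 0).length := by omega
  have htlen : ((psums nums 0).take j).length = j := by
    simp [List.length_take]; omega
  have hv : PySem.List.pyGetD nums ((j : Nat) : Int) 0 +
      (if ((j : Nat) : Int) > 0 then PySem.List.pyGetD ps (((j : Nat) : Int) - 1) 0 else 0)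
      = (psums nums 0).getD j 0 := by
    rw [h1, PySem.List.pyGetD_natCast]
    cases j with
    | zero =>
        simp only [Nat.cast_zero, gt_iff_lt, lt_self_iff_false, if_false, add_zero]
        rw [psums_getD nums 0 0 hjn]
        cases nums with
        | nil => simp at hjn
        | cons y t => simp
    | succ m =>
        have hcast : (((m + 1 : Nat) : Int) - 1) = ((m : Nat) : Int) := by push_cast; ring
        rw [if_pos (by positivity), hcast, PySem.List.pyGetD_natCast,
          List.getD_append _ _ _ m (by omega)]
        have hm1 : (psums nums 0).getD m 0 = 0 + (nums.take (m + 1)).sum :=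
          psums_getD nums 0 m (by omega)
        have hmt : ((psums nums 0).take (m + 1)).getD m 0 = (psums nums 0).getD m 0 := by
          simp [List.getD]
        rw [hmt, hm1, psums_getD nums 0 (m + 1) hjn,
          List.sum_take_succ nums (m + 1) hjn]
        have : nums.getD (m + 1) 0 = nums[m + 1] := by
          simp [List.getD, List.getElem?_eq_getElem hjn]
        rw [this]
        ring
  have htake : (psums nums 0).take j ++ [(psums nums 0).getD j 0] = (psums nums 0).take (j + 1) := by
    rw [List.take_succ]
    have : (psums nums 0)[j]?.toList = [(psums nums 0).getD j 0] := by
      simp [List.getD, List.getElem?_eq_getElem hjP]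
    rw [this]
  constructor
  · rw [hv, h1, Int.toNat_natCast, List.set_append, if_neg (by omega)]
    have hrep : nums.length - j = (nums.length - (j + 1)) + 1 := by omega
    rw [htlen, Nat.sub_self, hrep, List.replicate_succ, List.set_cons_zero, ← htake]
    simp
  · intro w
    rw [hv]
    have := seen_update ((psums nums 0).take j) ((psums nums 0).getD j 0) _ h2 w
    rw [htlen] at this
    rw [this, htake]

-- invariant of A's first loop
lemma a_loop1 (nums : List Int) :
    ∀ j, j ≤ nums.length →
      (((List.range j).foldl
        (fun (st : List Int × PySem.Dict Int Int) (i : Nat) =>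
          let v := PySem.List.pyGetD nums (i : Int) 0 +
            (if (i : Int) > 0 then PySem.List.pyGetD st.1 ((i : Int) - 1) 0 else 0)
          let ps := st.1.set (i : Int).toNat v
          let seen := if (st.2.get? v).isNone then st.2.insert v (i : Int) else st.2
          (ps, seen))
        (List.replicate nums.length 0, (PySem.Dict.empty).insert 0 (-1)))).1
        = (psums nums 0).take j ++ List.replicate (nums.length - j) 0 ∧
      ∀ v, (((List.range j).foldl
        (fun (st : List Int × PySem.Dict Int Int) (i : Nat) =>
          let v := PySem.List.pyGetD nums (i : Int) 0 +
            (if (i : Int) > 0 then PySem.List.pyGetD st.1 ((i : Int) - 1) 0 else 0)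
          let ps := st.1.set (i : Int).toNat v
          let seen := if (st.2.get? v).isNone then st.2.insert v (i : Int) else st.2
          (ps, seen))
        (List.replicate nums.length 0, (PySem.Dict.empty).insert 0 (-1)))).2.get? v
        = firstOcc ((psums nums 0).take j) v := by
  intro j
  induction j with
  | zero =>
      intro _
      rw [List.range_zero, List.foldl_nil]
      refine ⟨by simp, fun v => ?_⟩
      by_cases hv : v = 0
      · subst hv; simp [PySem.Dict.get?_insert_self, firstOcc]
      · rw [PySem.Dict.get?_insert_of_ne _ _ hv, PySem.Dict.get?_empty]
        simp [firstOcc, fIdx, hv]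
  | succ j ih =>
      intro hj
      obtain ⟨h1, h2⟩ := ih (Nat.le_of_succ_le hj)
      rw [List.range_succ, List.foldl_append, List.foldl_cons, List.foldl_nil]
      obtain ⟨hA, hB⟩ := a_step nums j hj _ _ h1 h2
      exact ⟨hA, hB⟩

-- A's second loop computes foldA'
lemma a_loop2 (full : List Int) (k : Int) (seen : PySem.Dict Int Int)
    (hseen : ∀ v, seen.get? v = firstOcc full v) :
    ∀ rest pre res, full = pre ++ rest →
      (List.range' pre.length rest.length).foldl
        (fun (res : Int) (i : Nat) =>
          match seen.get? (PySem.List.pyGetD full (i : Int) 0 - k) with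
          | some j => max res ((i : Int) - j)
          | none => res) res
      = foldA' full k rest pre res := by
  intro rest
  induction rest with
  | nil => intro pre res _; rfl
  | cons p t ih =>
      intro pre res hfull
      have hget : PySem.List.pyGetD full ((pre.length : Nat) : Int) 0 = p := by
        rw [PySem.List.pyGetD_natCast, hfull, List.getD_eq_getElem?_getD,
          List.getElem?_append_right (Nat.le_refl _)]
        simp
      rw [List.length_cons, List.range'_succ, List.foldl_cons, hget]
      have hlen : pre.length + 1 = (pre ++ [p]).length := by simp
      rw [hseen, hlen]
      unfold foldA'
      exact ih (pre ++ [p]) _ (by simp [hfull])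

-- ===== VERDICT (by name: the statement is the Claim_ definition above) =====
theorem prefixList_spec : Claim_equal_prefixList := by
  intro nums k _
  unfold Spec_prefixList prefixList prefixList_alt
  have hinit : ∀ v : Int, ((PySem.Dict.empty (κ := Int) (ν := Int)).insert 0 (-1)).get? v
      = firstOcc [] v := by
    intro v
    by_cases hv : v = 0
    · subst hv; simp [PySem.Dict.get?_insert_self, firstOcc]
    · rw [PySem.Dict.get?_insert_of_ne _ _ hv, PySem.Dict.get?_empty]
      simp [firstOcc, fIdx, hv]
  -- B's port computes foldB
  have hB := alt_loop k nums [] 0 0 _ hinit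
  simp only [List.length_nil, Nat.cast_zero] at hB
  rw [hB]
  -- A's first loop
  simp only [PySem.List.pyRange_zero_natCast, List.foldl_map]
  obtain ⟨h1, h2⟩ := a_loop1 nums nums.length (Nat.le_refl _)
  have hPlen : (psums nums 0).length = nums.length := psums_length nums 0
  have h1' : (((List.range nums.length).foldl
        (fun (st : List Int × PySem.Dict Int Int) (i : Nat) =>
          let v := PySem.List.pyGetD nums (i : Int) 0 +
            (if (i : Int) > 0 then PySem.List.pyGetD st.1 ((i : Int) - 1) 0 else 0)
          let ps := st.1.set (i : Int).toNat v
          let seen := if (st.2.get? v).isNone then st.2.insert v (i : Int) else st.2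
          (ps, seen))
        (List.replicate nums.length 0, (PySem.Dict.empty).insert 0 (-1)))).1
      = psums nums 0 := by
    rw [h1, Nat.sub_self]
    simp [List.take_of_length_le (le_of_eq hPlen)]
  have h2' : ∀ v, (((List.range nums.length).foldl
        (fun (st : List Int × PySem.Dict Int Int) (i : Nat) =>
          let v := PySem.List.pyGetD nums (i : Int) 0 +
            (if (i : Int) > 0 then PySem.List.pyGetD st.1 ((i : Int) - 1) 0 else 0)
          let ps := st.1.set (i : Int).toNat v
          let seen := if (st.2.get? v).isNone then st.2.insert v (i : Int) else st.2
          (ps, seen))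
        (List.replicate nums.length 0, (PySem.Dict.empty).insert 0 (-1)))).2.get? v
      = firstOcc (psums nums 0) v := by
    intro v
    rw [h2 v, List.take_of_length_le (le_of_eq hPlen)]
  rw [h1']
  -- A's second loop
  have step2 := a_loop2 (psums nums 0) k _ h2' (psums nums 0) [] 0 (by simp)
  simp only [PySem.List.pyRange_zero_natCast, List.foldl_map, List.range_eq_range'] at step2 ⊢
  exact step2.trans (foldA'_eq_foldB k (psums nums 0) (psums nums 0) [] 0 (by simp) (le_refl 0))
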